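-- pv_equiv track=rewrite | github.com/stanley-910/anki-gen | anki_gen/generator.py | chunk_concepts
-- ===== SOURCE A (Python) =====
-- def chunk_concepts(
--     concepts: list[str],
--     reversed_concepts: set[str] | None,
--     chunk_size: int,
-- ) -> list[tuple[list[str], set[str] | None]]:
--     """Split *concepts* into sequential batches of *chunk_size*.
--
--     Each batch is paired with the subset of *reversed_concepts* that belongs
--     to it, so every chunk is self-contained and the caller never needs to
--     filter the reversed set itself.
--
--     Returns a list of ``(concept_chunk, reversed_chunk)`` tuples preserving
--     the original concept order.  When *concepts* is empty the result is empty.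
--     """
--     if not concepts:
--         return []
--     chunks: list[tuple[list[str], set[str] | None]] = []
--     for i in range(0, len(concepts), chunk_size):
--         batch = concepts[i : i + chunk_size]
--         if reversed_concepts:
--             rev_batch: set[str] | None = reversed_concepts & set(batch)
--             rev_batch = rev_batch if rev_batch else None
--         else:
--             rev_batch = None
--         chunks.append((batch, rev_batch))
--     return chunks
-- ===== SOURCE B (Python) =====
-- def chunk_concepts(
--     concepts: list[str],
--     reversed_concepts: set[str] | None,
--     chunk_size: int,
-- ) -> list[tuple[list[str], set[str] | None]]:
--     """Slice concepts into batches while building an index concept -> chunk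
--     indices, then distribute reversed_concepts in one pass over that index
--     instead of intersecting each batch with the reversed set."""
--     if not concepts:
--         return []
--     batches: list[list[str]] = []
--     index: dict[str, set[int]] = {}
--     for i in range(0, len(concepts), chunk_size):
--         batch = concepts[i : i + chunk_size]
--         ci = len(batches)
--         for c in batch:
--             index.setdefault(c, set()).add(ci)
--         batches.append(batch)
--     if not reversed_concepts:
--         return [(b, None) for b in batches]
--     revs: list[set[str]] = [set() for _ in batches]
--     for r in reversed_concepts:
--         for ci in index.get(r, ()):
--             revs[ci].add(r)
--     return [(b, rv if rv else None) for b, rv in zip(batches, revs)]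
-- ===== Notes on version B (the rewrite author's own statement) =====
-- stated objective: alternative
-- what changed: Replaces the per-chunk set intersection with an inverted index built while slicing (concept -> set of chunk indices) and a single distribution pass over reversed_concepts that drops each member into the per-chunk sets it belongs to.
import Mathlib
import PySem

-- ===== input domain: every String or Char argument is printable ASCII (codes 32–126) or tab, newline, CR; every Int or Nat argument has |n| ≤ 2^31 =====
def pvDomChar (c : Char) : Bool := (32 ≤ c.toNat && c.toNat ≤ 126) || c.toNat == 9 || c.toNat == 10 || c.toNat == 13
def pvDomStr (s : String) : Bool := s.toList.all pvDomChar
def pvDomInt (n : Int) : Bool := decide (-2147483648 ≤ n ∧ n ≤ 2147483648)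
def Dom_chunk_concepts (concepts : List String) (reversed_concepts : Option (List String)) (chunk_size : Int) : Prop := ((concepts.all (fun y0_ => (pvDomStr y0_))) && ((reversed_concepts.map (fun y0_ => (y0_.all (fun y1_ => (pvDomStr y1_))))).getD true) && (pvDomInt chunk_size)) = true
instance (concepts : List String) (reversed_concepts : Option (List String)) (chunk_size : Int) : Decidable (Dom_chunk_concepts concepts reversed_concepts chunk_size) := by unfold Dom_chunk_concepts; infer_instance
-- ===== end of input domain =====

-- B replaces A's per-chunk set intersection by an inverted index (concept → set of chunk
-- indices) built while slicing, plus one distribution pass over reversed_concepts.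

-- ===== PORT A =====
def chunk_concepts (concepts : List String) (reversed_concepts : Option (List String)) (chunk_size : Int) : List (List String × Option (List String)) :=
  if concepts = [] then []
  else
    (PySem.List.pyRange 0 (concepts.length : Int) chunk_size).foldl
      (fun chunks i =>
        let batch := PySem.List.slice concepts (some i) (some (i + chunk_size))
        let rev_batch : Option (List String) :=
          match reversed_concepts with
          | some s =>
            if s ≠ [] then
              let rb := PySem.Set.inter s (PySem.Set.ofList batch)
              if rb ≠ [] then some rb else none
            else none
          | none => none
        chunks ++ [(batch, rev_batch)]) []

-- ===== PORT B =====
def chunk_concepts_alt (concepts : List String) (reversed_concepts : Option (List String)) (chunk_size : Int) : List (List String × Option (List String)) :=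
  if concepts = [] then []
  else
    let st := (PySem.List.pyRange 0 (concepts.length : Int) chunk_size).foldl
      (fun (st : List (List String) × PySem.Dict String (List Int)) i =>
        let batch := PySem.List.slice concepts (some i) (some (i + chunk_size))
        let ci : Int := (st.1.length : Int)
        let idx := batch.foldl (fun d c => PySem.Dict.modify d c [] (fun t => PySem.Set.add t ci)) st.2
        (st.1 ++ [batch], idx)) (([] : List (List String)), (PySem.Dict.empty : PySem.Dict String (List Int)))
    let batches := st.1
    let index := st.2
    match reversed_concepts with
    | none => batches.map (fun b => (b, none))
    | some s =>
      if s = [] then batches.map (fun b => (b, none))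
      else
        let revs := s.foldl (fun revs r =>
            (PySem.Dict.getD index r []).foldl (fun revs ci =>
              PySem.List.pySetD revs ci (PySem.Set.add (PySem.List.pyGetD revs ci []) r)) revs)
          (batches.map (fun _ => ([] : List String)))
        (batches.zip revs).map (fun p => (p.1, if p.2 = [] then none else some p.2))

-- ===== PRECONDITION & SPEC =====
-- Pre_ excludes (a) chunk_size = 0 with nonempty concepts, where Python's range raises
-- ValueError, and (b) a reversed_concepts list with duplicates, which does not encode any
-- Python set (the argument is a set, so its list encoding holds distinct elements).
def Pre_chunk_concepts (concepts : List String) (reversed_concepts : Option (List String)) (chunk_size : Int) : Prop :=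
  (concepts = [] ∨ chunk_size ≠ 0) ∧ (reversed_concepts.getD []).Nodup
instance (concepts : List String) (reversed_concepts : Option (List String)) (chunk_size : Int) : Decidable (Pre_chunk_concepts concepts reversed_concepts chunk_size) := by unfold Pre_chunk_concepts; infer_instance
def pvWitness_chunk_concepts : List String × Option (List String) × Int := (["a", "b", "c"], some ["c", "a"], 2)

def Spec_chunk_concepts (concepts : List String) (reversed_concepts : Option (List String)) (chunk_size : Int) (out : List (List String × Option (List String))) : Prop := out = chunk_concepts_alt concepts reversed_concepts chunk_size
instance (concepts : List String) (reversed_concepts : Option (List String)) (chunk_size : Int) (out : List (List String × Option (List String))) : Decidable (Spec_chunk_concepts concepts reversed_concepts chunk_size out) := by unfold Spec_chunk_concepts; infer_instance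

-- ===== CLAIM (what is proved, stated in full; the proofs are below) =====
def Claim_equal_chunk_concepts : Prop := ∀ (concepts : List String) (reversed_concepts : Option (List String)) (chunk_size : Int), Dom_chunk_concepts concepts reversed_concepts chunk_size → Pre_chunk_concepts concepts reversed_concepts chunk_size → Spec_chunk_concepts concepts reversed_concepts chunk_size (chunk_concepts concepts reversed_concepts chunk_size)

-- ===== LEMMAS AND PROOFS =====

/-- building the batches list by appended singletons is a map -/
theorem pv_foldl_app {α β : Type} (f : α → β) (l : List α) (acc : List β) :
    l.foldl (fun ch i => ch ++ [f i]) acc = acc ++ l.map f := by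
  induction l generalizing acc <;> simp [*]

/-- the index-building part of B's fold, abstracted over the batch list -/
def pvIdxFold : List (List String) → Nat → PySem.Dict String (List Int) → PySem.Dict String (List Int)
  | [], _, d => d
  | b :: bs, k, d =>
      pvIdxFold bs (k + 1) (b.foldl (fun d c => PySem.Dict.modify d c [] (fun t => PySem.Set.add t (k : Int))) d)

theorem pv_build_eq (concepts : List String) (chunk_size : Int)
    (R : List Int) (bs : List (List String)) (d : PySem.Dict String (List Int)) :
    R.foldl
      (fun (st : List (List String) × PySem.Dict String (List Int)) i =>
        let batch := PySem.List.slice concepts (some i) (some (i + chunk_size))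
        let ci : Int := (st.1.length : Int)
        let idx := batch.foldl (fun d c => PySem.Dict.modify d c [] (fun t => PySem.Set.add t ci)) st.2
        (st.1 ++ [batch], idx)) (bs, d)
    = (bs ++ R.map (fun i => PySem.List.slice concepts (some i) (some (i + chunk_size))),
       pvIdxFold (R.map (fun i => PySem.List.slice concepts (some i) (some (i + chunk_size)))) bs.length d) := by
  induction R generalizing bs d with
  | nil => simp [pvIdxFold]
  | cons i R ih => simp [ih, pvIdxFold]

theorem pv_mem_batch_fold (b : List String) (v : Int) (d : PySem.Dict String (List Int)) (x : String) (j : Int) :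
    j ∈ (b.foldl (fun d c => PySem.Dict.modify d c [] (fun t => PySem.Set.add t v)) d).getD x []
      ↔ j ∈ d.getD x [] ∨ (x ∈ b ∧ j = v) := by
  induction b generalizing d with
  | nil => simp
  | cons c b ih =>
    simp only [List.foldl_cons, ih, PySem.Dict.getD_modify]
    by_cases hx : x = c
    · subst hx
      simp [PySem.Set.mem_add]
      tauto
    · rw [if_neg hx]
      simp only [List.mem_cons]
      tauto

theorem pv_mem_idxFold (Bs : List (List String)) (k : Nat) (d : PySem.Dict String (List Int)) (x : String) (j : Int) :
    j ∈ (pvIdxFold Bs k d).getD x []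
      ↔ j ∈ d.getD x [] ∨ ∃ m, ∃ _ : m < Bs.length, j = ((k + m : Nat) : Int) ∧ x ∈ Bs[m] := by
  induction Bs generalizing k d with
  | nil => simp [pvIdxFold]
  | cons b Bs ih =>
    rw [pvIdxFold, ih, pv_mem_batch_fold]
    constructor
    · rintro ((h | ⟨hb, rfl⟩) | ⟨m, hm, rfl, hx⟩)
      · exact Or.inl h
      · exact Or.inr ⟨0, by simp, by simp, by simpa using hb⟩
      · exact Or.inr ⟨m + 1, by simpa using hm, by push_cast; ring_nf, by simpa using hx⟩
    · rintro (h | ⟨m, hm, rfl, hx⟩)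
      · exact Or.inl (Or.inl h)
      · cases m with
        | zero => exact Or.inl (Or.inr ⟨by simpa using hx, by simp⟩)
        | succ m =>
          exact Or.inr ⟨m, by simpa using hm, by push_cast; ring_nf, by simpa using hx⟩

theorem pv_len_inner (L : List Int) (r : String) (revs : List (List String)) :
    (L.foldl (fun revs ci =>
      PySem.List.pySetD revs ci (PySem.Set.add (PySem.List.pyGetD revs ci []) r)) revs).length
    = revs.length := by
  induction L generalizing revs with
  | nil => rfl
  | cons ci L ih => simp [ih, PySem.List.length_pySetD]

theorem pv_inner_get (L : List Int) (r : String) (revs : List (List String)) (k : Nat)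
    (hk : k < revs.length) (hL : ∀ j ∈ L, 0 ≤ j ∧ j < (revs.length : Int)) :
    PySem.List.pyGetD
      (L.foldl (fun revs ci =>
        PySem.List.pySetD revs ci (PySem.Set.add (PySem.List.pyGetD revs ci []) r)) revs) (k : Int) []
    = if (k : Int) ∈ L then PySem.Set.add (PySem.List.pyGetD revs (k : Int) []) r
      else PySem.List.pyGetD revs (k : Int) [] := by
  induction L generalizing revs with
  | nil => simp
  | cons ci L ih =>
    obtain ⟨hci0, hciLt⟩ := hL ci (by simp)
    obtain ⟨n, rfl⟩ : ∃ n : Nat, ci = (n : Int) := ⟨ci.toNat, (Int.toNat_of_nonneg hci0).symm⟩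
    have hn : n < revs.length := by exact_mod_cast hciLt
    have hlen : (PySem.List.pySetD revs (n : Int) (PySem.Set.add (PySem.List.pyGetD revs (n : Int) []) r)).length = revs.length :=
      PySem.List.length_pySetD ..
    rw [List.foldl_cons, ih _ (by omega) (fun j hj => by rw [hlen]; exact hL j (by simp [hj]))]
    rw [PySem.List.pyGetD_pySetD_natCast _ _ _ _ _ hn]
    by_cases hkn : k = n
    · subst hkn
      by_cases hmem : (k : Int) ∈ L <;> simp [hmem]
    · have : ¬ ((k : Int) = (n : Int)) := by exact_mod_cast hkn
      simp [hkn, this]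

theorem pv_outer_len (index : PySem.Dict String (List Int)) (s : List String) (revs : List (List String)) :
    (s.foldl (fun revs r =>
      (PySem.Dict.getD index r []).foldl (fun revs ci =>
        PySem.List.pySetD revs ci (PySem.Set.add (PySem.List.pyGetD revs ci []) r)) revs) revs).length
    = revs.length := by
  induction s generalizing revs with
  | nil => rfl
  | cons r s ih => simp [ih, pv_len_inner]

theorem pv_outer_get (index : PySem.Dict String (List Int)) (s : List String) (revs : List (List String)) (k : Nat)
    (hk : k < revs.length)
    (hIdx : ∀ r j, j ∈ PySem.Dict.getD index r [] → 0 ≤ j ∧ j < (revs.length : Int)) :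
    PySem.List.pyGetD
      (s.foldl (fun revs r =>
        (PySem.Dict.getD index r []).foldl (fun revs ci =>
          PySem.List.pySetD revs ci (PySem.Set.add (PySem.List.pyGetD revs ci []) r)) revs) revs) (k : Int) []
    = s.foldl (fun acc r => if (k : Int) ∈ PySem.Dict.getD index r [] then PySem.Set.add acc r else acc)
        (PySem.List.pyGetD revs (k : Int) []) := by
  induction s generalizing revs with
  | nil => simp
  | cons r s ih =>
    have hlen := pv_len_inner (PySem.Dict.getD index r []) r revs
    rw [List.foldl_cons, List.foldl_cons,
      ih _ (by omega) (fun r' j hj => by rw [hlen]; exact hIdx r' j hj),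
      pv_inner_get _ _ _ _ hk (fun j hj => hIdx r j hj)]

theorem pv_flatten_single {α β : Type} (f : α → β) (l : List α) :
    (l.map (fun x => [f x])).flatten = l.map f := by
  induction l <;> simp_all

theorem pv_filter_of_nodup (s : List String) (p : String → Prop) [DecidablePred p] (hs : s.Nodup) :
    s.foldl (fun acc r => if p r then PySem.Set.add acc r else acc) []
    = s.filter (fun r => decide (p r)) := by
  rw [PySem.List.foldl_ite_eq_foldl_filter, ← PySem.Set.ofList_eq_foldl,
    PySem.Set.ofList_eq_self_of_nodup _ (hs.filter _)]

-- ===== VERDICT (by name: the statement is the Claim_ definition above) =====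
theorem chunk_concepts_spec : Claim_equal_chunk_concepts := by
  intro concepts rc cs _ hPre
  unfold Spec_chunk_concepts chunk_concepts chunk_concepts_alt
  by_cases hc : concepts = []
  · simp [hc]
  · simp only [hc, if_false]
    rw [pv_build_eq]
    simp only [List.length_nil, List.nil_append]
    set bf : Int → List String := fun i => PySem.List.slice concepts (some i) (some (i + cs)) with hbf
    set R := PySem.List.pyRange 0 (concepts.length : Int) cs with hR
    set Bs := R.map bf with hBs
    set index := pvIdxFold Bs 0 PySem.Dict.empty with hindex
    have hIdxMem : ∀ (x : String) (j : Int),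
        j ∈ PySem.Dict.getD index x [] ↔ ∃ m, ∃ _ : m < Bs.length, j = (m : Int) ∧ x ∈ Bs[m] := by
      intro x j
      rw [hindex, pv_mem_idxFold]
      simp [PySem.Dict.getD_empty]
    match rc with
    | none =>
      simp [pv_flatten_single, hBs, List.map_map, Function.comp_def]
      exact fun a _ => rfl
    | some s =>
      by_cases hs : s = []
      · simp [hs, pv_flatten_single, hBs, List.map_map, Function.comp_def]
        exact fun a _ => rfl
      · have hnodup : s.Nodup := by simpa using hPre.2
        simp only [hs, ne_eq, not_false_eq_true, if_true, if_false]
        rw [pv_foldl_app]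
        set revs0 := Bs.map (fun _ => ([] : List String)) with hrevs0
        have hrevs0len : revs0.length = Bs.length := by simp [hrevs0]
        have hIdxRange : ∀ r j, j ∈ PySem.Dict.getD index r [] → 0 ≤ j ∧ j < (revs0.length : Int) := by
          intro r j hj
          obtain ⟨m, hm, rfl, _⟩ := (hIdxMem r j).1 hj
          refine ⟨by positivity, ?_⟩
          rw [hrevs0len]; exact_mod_cast hm
        set revsF := s.foldl (fun revs r =>
            (PySem.Dict.getD index r []).foldl (fun revs ci =>
              PySem.List.pySetD revs ci (PySem.Set.add (PySem.List.pyGetD revs ci []) r)) revs) revs0 with hrevsF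
        have hlenF : revsF.length = Bs.length := by rw [hrevsF, pv_outer_len, hrevs0len]
        have hBsR : Bs.length = R.length := by simp [hBs]
        apply List.ext_getElem
        · simp only [List.nil_append, List.length_map, List.length_zip, hlenF, hBsR, Nat.min_self]
        · intro k hk1 hk2
          have hkB : k < Bs.length := by simpa [hBsR] using hk1
          have hget : revsF[k]'(by omega) = PySem.Set.inter s (PySem.Set.ofList (Bs[k]'hkB)) := by
            have h1 : PySem.List.pyGetD revsF ((k : Nat) : Int) [] = revsF[k]'(by omega) := by
              rw [PySem.List.pyGetD_eq_getElem _ _ (by positivity) (by simp; omega)]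
              simp only [Int.toNat_natCast]
            rw [← h1, hrevsF, pv_outer_get index s revs0 k (by omega) hIdxRange]
            have h0 : PySem.List.pyGetD revs0 ((k : Nat) : Int) [] = [] := by
              rw [PySem.List.pyGetD_eq_getElem _ _ (by positivity) (by simp [hrevs0len]; omega)]
              simp [hrevs0]
            rw [h0, pv_filter_of_nodup _ _ hnodup]
            show s.filter _ = s.filter _
            apply List.filter_congr
            intro r _
            have hmem : ((k : Int) ∈ PySem.Dict.getD index r []) ↔ r ∈ Bs[k]'hkB := by
              rw [hIdxMem]
              constructor
              · rintro ⟨m, hm, he, hx⟩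
                have : k = m := by exact_mod_cast he
                subst this; exact hx
              · intro h; exact ⟨k, hkB, rfl, h⟩
            rw [Bool.eq_iff_iff]
            simp [hmem, PySem.Set.mem_ofList]
          simp only [List.nil_append, List.getElem_map, List.getElem_zip]
          have hBk : Bs[k]'hkB = bf (R[k]'(by omega)) := by simp [hBs]
          refine Prod.ext hBk.symm ?_
          show _ = (if revsF[k]'(by omega) = [] then none else some (revsF[k]'(by omega)))
          rw [hget, hBk]
          simp only [hbf]
          by_cases hrb : PySem.Set.inter s
              (PySem.Set.ofList (PySem.List.slice concepts (some (R[k]'(by omega))) (some (R[k]'(by omega) + cs)))) = [] <;>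
            simp [hrb]
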